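-- pv_equiv track=rewrite | github.com/jayasurya-n/Leetcode | Daily_Problems/2025/July/q17.py | maximumLength
-- ===== SOURCE A (Python) =====
-- from typing import List,Optional
--
-- def maximumLength(nums: List[int], k: int) -> int:
--     n = len(nums)
--     # dp[i][rem]: max length subsequnce ending at i with reminder rem
--     dp = [[0]*k for _ in range(n)]
--
--     for i in range(1,n):
--         for j in range(i):
--             rem = (nums[i]+nums[j])%k
--             dp[i][rem] = max(dp[i][rem],dp[j][rem]+1)
--     return 1+max(max(row) for row in dp)
-- ===== SOURCE B (Python) =====
-- def maximumLength(nums, k):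
--     # chain[(w, v)] = length (>= 2) of the longest valid subsequence seen so far whose
--     # last two elements have residues w, v (mod k); a valid subsequence is determined
--     # by its alternating pair of residues, so only residues actually seen matter.
--     best = 0
--     chain = {}
--     seen = set()
--     for x in nums:
--         v = x % k
--         if best < 1:
--             best = 1
--         get = chain.get
--         for w in seen:
--             cur = get((v, w), 1) + 1
--             if cur > get((w, v), 0):
--                 chain[(w, v)] = cur
--                 if cur > best:
--                     best = cur
--         seen.add(v)
--     return best
-- ===== Notes on version B (the rewrite author's own statement) =====
-- stated objective: alternative
-- what changed: Replaces the O(n^2) per-index pair DP (dp[i][rem] over all earlier indices j, with an n-by-k table) by a sparse residue DP: a dict chain[(w,v)] holding the best subsequence length ending with residue pair (w,v), updated once per (element, seen residue) pair, so only residues that actually occur are ever touched.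
import Mathlib
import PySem

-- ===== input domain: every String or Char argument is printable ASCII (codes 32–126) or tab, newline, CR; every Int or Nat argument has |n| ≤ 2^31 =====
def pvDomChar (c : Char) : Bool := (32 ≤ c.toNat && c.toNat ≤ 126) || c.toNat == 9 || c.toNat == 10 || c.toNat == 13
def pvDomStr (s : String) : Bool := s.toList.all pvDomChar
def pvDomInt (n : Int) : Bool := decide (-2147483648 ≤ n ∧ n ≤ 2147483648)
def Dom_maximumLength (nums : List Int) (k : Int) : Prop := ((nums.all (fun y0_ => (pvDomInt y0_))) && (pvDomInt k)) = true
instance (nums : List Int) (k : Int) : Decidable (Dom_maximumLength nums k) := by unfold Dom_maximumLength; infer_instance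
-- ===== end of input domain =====

-- B replaces A's per-index pair DP over an n×k table by a sparse dict DP keyed by residue pairs.

-- ===== PORT A =====
-- Literal port of A. dp cell access uses the total pyGetD/pySetD and Python's max() of a
-- nonempty list is (max? …).getD 0; inside Pre_ (nums ≠ [], 1 ≤ k) every index is in range
-- and every maximised list is nonempty, so the port is exact there (outside Pre_ Python raises).
def maximumLength (nums : List Int) (k : Int) : Int :=
  let n := nums.length
  let dp : List (List Int) :=
    (PySem.List.pyRange 0 (n : Int) 1).map (fun _ => PySem.List.pyRepeat [(0 : Int)] k)
  let dp :=
    (PySem.List.pyRange 1 (n : Int) 1).foldl (fun dp i =>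
      (PySem.List.pyRange 0 i 1).foldl (fun dp j =>
        let rem := PySem.Int.mod (PySem.List.pyGetD nums i 0 + PySem.List.pyGetD nums j 0) k
        PySem.List.pySetD dp i
          (PySem.List.pySetD (PySem.List.pyGetD dp i []) rem
            (max (PySem.List.pyGetD (PySem.List.pyGetD dp i []) rem 0)
                 (PySem.List.pyGetD (PySem.List.pyGetD dp j []) rem 0 + 1)))) dp) dp
  1 + (PySem.List.max? (dp.map (fun row => (PySem.List.max? row (fun y => y)).getD 0)) (fun y => y)).getD 0

-- ===== PORT B =====
-- Literal port of Source B: sparse residue-pair DP; chain is a dict keyed by residue pairs,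
-- seen the set of residues so far.  The `for w in seen` loop writes a distinct key (w, v)
-- per iteration and only folds into running maxima, so its result does not depend on
-- Python's set iteration order; the port iterates the set in first-insertion order.
def maximumLength_alt (nums : List Int) (k : Int) : Int :=
  (nums.foldl (fun (st : Int × PySem.Dict (Int × Int) Int × PySem.Set Int) x =>
      let v := PySem.Int.mod x k
      let best := if st.1 < 1 then 1 else st.1
      let bc := st.2.2.foldl (fun (bc : Int × PySem.Dict (Int × Int) Int) w =>
          let cur := bc.2.getD (v, w) 1 + 1
          if cur > bc.2.getD (w, v) 0 then
            (if cur > bc.1 then cur else bc.1, bc.2.insert (w, v) cur)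
          else bc) (best, st.2.1)
      (bc.1, bc.2, PySem.Set.add st.2.2 v))
    (0, PySem.Dict.empty, PySem.Set.empty)).1

-- ===== PRECONDITION & SPEC =====
-- A raises outside this: ValueError (max of an empty sequence) for nums = [] or k < 0,
-- ZeroDivisionError for k = 0, IndexError for negative k with n ≥ 2.
def Pre_maximumLength (nums : List Int) (k : Int) : Prop := nums ≠ [] ∧ 1 ≤ k
instance (nums : List Int) (k : Int) : Decidable (Pre_maximumLength nums k) := by
  unfold Pre_maximumLength; infer_instance
def pvWitness_maximumLength : List Int × Int := ([1, 2, 3, 4, 5], 3)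

def Spec_maximumLength (nums : List Int) (k : Int) (out : Int) : Prop := out = maximumLength_alt nums k
instance (nums : List Int) (k : Int) (out : Int) : Decidable (Spec_maximumLength nums k out) := by
  unfold Spec_maximumLength; infer_instance

-- ===== CLAIM (what is proved, stated in full; the proofs are below) =====
def Claim_equal_maximumLength : Prop := ∀ (nums : List Int) (k : Int), Dom_maximumLength nums k → Pre_maximumLength nums k → Spec_maximumLength nums k (maximumLength nums k)

-- ===== LEMMAS AND PROOFS =====

-- running max over j < m of g j, floored at 0
def Rmax (m : Nat) (g : Nat → Int) : Int := (List.range m).foldl (fun a j => max a (g j)) 0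

-- residue of the pair (i, j) in A
def remA (nums : List Int) (k : Int) (i j : Nat) : Int :=
  PySem.Int.mod (nums.getD i 0 + nums.getD j 0) k

-- model of A's dp[i][r]
def dA (nums : List Int) (k : Int) (i : Nat) (r : Int) : Int :=
  (List.range i).attach.foldl
    (fun acc j => if remA nums k i j.1 = r then max acc (dA nums k j.1 r + 1) else acc) 0
termination_by i
decreasing_by exact List.mem_range.mp j.2

def rowFn (K : Nat) (g : Nat → Int) : List Int := (List.range K).map g
def tabFn (n K : Nat) (g : Nat → Nat → Int) : List (List Int) := (List.range n).map (fun i => rowFn K (g i))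

-- the loop bodies of the two ports, named for the proofs (definitionally the ports' lambdas)
def innerA (nums : List Int) (k : Int) (i : Int) (dp : List (List Int)) (j : Int) : List (List Int) :=
  PySem.List.pySetD dp i
    (PySem.List.pySetD (PySem.List.pyGetD dp i [])
      (PySem.Int.mod (PySem.List.pyGetD nums i 0 + PySem.List.pyGetD nums j 0) k)
      (max (PySem.List.pyGetD (PySem.List.pyGetD dp i [])
              (PySem.Int.mod (PySem.List.pyGetD nums i 0 + PySem.List.pyGetD nums j 0) k) 0)
           (PySem.List.pyGetD (PySem.List.pyGetD dp j [])
              (PySem.Int.mod (PySem.List.pyGetD nums i 0 + PySem.List.pyGetD nums j 0) k) 0 + 1)))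

def outerA (nums : List Int) (k : Int) (dp : List (List Int)) (i : Int) : List (List Int) :=
  (PySem.List.pyRange 0 i 1).foldl (innerA nums k i) dp

lemma portA_unfold (nums : List Int) (k : Int) :
    maximumLength nums k =
      1 + (PySem.List.max?
        (((PySem.List.pyRange 1 (nums.length : Int) 1).foldl (outerA nums k)
            ((PySem.List.pyRange 0 (nums.length : Int) 1).map
              (fun _ => PySem.List.pyRepeat [(0 : Int)] k))).map
          (fun row => (PySem.List.max? row (fun y => y)).getD 0)) (fun y => y)).getD 0 := rfl

lemma Rmax_zero (g : Nat → Int) : Rmax 0 g = 0 := rfl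

lemma Rmax_succ (m : Nat) (g : Nat → Int) : Rmax (m + 1) g = max (Rmax m g) (g m) := by
  simp [Rmax, List.range_succ]

lemma Rmax_nonneg (m : Nat) (g : Nat → Int) : 0 ≤ Rmax m g := by
  induction m with
  | zero => exact le_refl 0
  | succ m ih => rw [Rmax_succ]; exact le_trans ih (le_max_left _ _)

lemma le_Rmax (m : Nat) (g : Nat → Int) {j : Nat} (h : j < m) : g j ≤ Rmax m g := by
  induction m with
  | zero => omega
  | succ m ih =>
    rw [Rmax_succ]
    rcases Nat.lt_succ_iff_lt_or_eq.mp h with h' | h'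
    · exact le_trans (ih h') (le_max_left _ _)
    · subst h'; exact le_max_right _ _

lemma Rmax_le_iff (m : Nat) (g : Nat → Int) (b : Int) :
    Rmax m g ≤ b ↔ 0 ≤ b ∧ ∀ j < m, g j ≤ b := by
  constructor
  · intro h
    exact ⟨le_trans (Rmax_nonneg m g) h, fun j hj => le_trans (le_Rmax m g hj) h⟩
  · rintro ⟨h0, h⟩
    induction m with
    | zero => exact h0
    | succ m ih =>
      rw [Rmax_succ]
      exact max_le (ih (fun j hj => h j (by omega))) (h m (by omega))

lemma Rmax_congr (m : Nat) (g g' : Nat → Int) (h : ∀ j < m, g j = g' j) :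
    Rmax m g = Rmax m g' := by
  induction m with
  | zero => rfl
  | succ m ih =>
    rw [Rmax_succ, Rmax_succ, ih (fun j hj => h j (by omega)), h m (by omega)]

lemma foldl_ite_max {α : Type} (l : List α) (c : α → Prop) [DecidablePred c]
    (x : α → Int) (init : Int) (h0 : 0 ≤ init) :
    l.foldl (fun a e => if c e then max a (x e) else a) init
      = l.foldl (fun a e => max a (if c e then x e else 0)) init := by
  induction l generalizing init with
  | nil => rfl
  | cons e t ih =>
    simp only [List.foldl_cons]
    by_cases hc : c e
    · simp only [if_pos hc]
      exact ih _ (le_trans h0 (le_max_left _ _))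
    · simp only [if_neg hc, max_eq_left h0]
      exact ih _ h0

lemma dA_eq (nums : List Int) (k : Int) (i : Nat) (r : Int) :
    dA nums k i r = Rmax i (fun j => if remA nums k i j = r then dA nums k j r + 1 else 0) := by
  rw [dA, List.foldl_attach
        (f := fun (acc : Int) jn => if remA nums k i jn = r then max acc (dA nums k jn r + 1) else acc),
      foldl_ite_max _ _ _ _ (le_refl 0), Rmax]

lemma dA_nonneg (nums : List Int) (k : Int) (i : Nat) (r : Int) : 0 ≤ dA nums k i r := by
  rw [dA_eq]; exact Rmax_nonneg _ _

-- the residue bridge: (a + b) % k = r ↔ a % k = (r - b) % k for r in [0, k)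
lemma dA_zero (nums : List Int) (k : Int) (r : Int) : dA nums k 0 r = 0 := by
  rw [dA_eq]; rfl

lemma cond_iff (a b r k : Int) (hk : 0 < k) (hr0 : 0 ≤ r) (hrk : r < k) :
    PySem.Int.mod (a + b) k = r ↔ PySem.Int.mod a k = PySem.Int.mod (r - b) k := by
  rw [PySem.Int.mod_eq_emod_of_pos hk, PySem.Int.mod_eq_emod_of_pos hk,
      PySem.Int.mod_eq_emod_of_pos hk]
  have hr : r % k = r := Int.emod_eq_of_lt hr0 hrk
  constructor
  · intro h
    have hm : (a + b) % k = r % k := by rw [hr]; exact h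
    have h2 := Int.ModEq.sub_right b hm
    simpa using h2
  · intro h
    have h2 := Int.ModEq.add_right b h
    have h3 : (a + b) % k = r % k := by simpa using h2
    rw [h3, hr]

lemma rowFn_set {K : Nat} (g : Nat → Int) {v : Nat} (x : Int) :
    (rowFn K g).set v x = rowFn K (fun v' => if v' = v then x else g v') := by
  apply List.ext_getElem <;> simp [rowFn]
  intro i hi
  rw [List.getElem_set]
  rcases eq_or_ne i v with h' | h'
  · simp [h']
  · simp [h', h'.symm]

lemma rowFn_congr {K : Nat} {g g' : Nat → Int} (h : ∀ v < K, g v = g' v) : rowFn K g = rowFn K g' := by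
  apply List.map_congr_left
  intro v hv
  exact h v (List.mem_range.mp hv)

lemma tabFn_getD {n K : Nat} (g : Nat → Nat → Int) {i : Nat} (h : i < n) :
    (tabFn n K g).getD i [] = rowFn K (g i) := by
  rw [tabFn, List.getD_eq_getElem _ _ (by simpa using h)]
  simp

lemma tabFn_set {n K : Nat} (g : Nat → Nat → Int) {i : Nat} (g' : Nat → Int) :
    (tabFn n K g).set i (rowFn K g') = tabFn n K (fun i' => if i' = i then g' else g i') := by
  apply List.ext_getElem <;> simp [tabFn]
  intro j hj
  rw [List.getElem_set]
  rcases eq_or_ne j i with h' | h'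
  · simp [h']
  · simp [h', h'.symm]

lemma tabFn_congr {n K : Nat} {g g' : Nat → Nat → Int} (h : ∀ i < n, ∀ v < K, g i v = g' i v) :
    tabFn n K g = tabFn n K g' := by
  apply List.map_congr_left
  intro i hi
  exact rowFn_congr (h i (List.mem_range.mp hi))

lemma rowFn_pyGetD {K : Nat} (g : Nat → Int) {r : Int} (hk0 : 0 ≤ r) (hk1 : r.toNat < K) :
    PySem.List.pyGetD (rowFn K g) r 0 = g r.toNat := by
  rw [PySem.List.pyGetD_eq_getElem _ 0 hk0 (by simp [rowFn]; omega)]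
  simp [rowFn]

-- the zero table both ports build as their comprehension `[[0]*k for _ in range(N)]`
lemma init_tab (N : Nat) (k : Int) {K : Nat} (hK : K = k.toNat) :
    (PySem.List.pyRange 0 (N : Int) 1).map (fun _ => PySem.List.pyRepeat [(0 : Int)] k)
      = tabFn N K (fun _ _ => 0) := by
  subst hK
  rw [PySem.List.pyRepeat_singleton]
  simp [tabFn, rowFn, List.map_const', PySem.List.length_pyRange_one]

lemma pyRange_zero_pos (k : Int) (hk : 0 ≤ k) :
    PySem.List.pyRange 0 k 1 = (List.range k.toNat).map (fun (q : Nat) => (q : Int)) := by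
  rw [PySem.List.pyRange_one 0 k]
  simp only [sub_zero, zero_add]

lemma maxD_rowFn {K : Nat} (hK : 0 < K) (f : Nat → Int) (hf : 0 ≤ f 0) :
    (PySem.List.max? (rowFn K f) (fun y => y)).getD 0 = Rmax K f := by
  obtain ⟨K', rfl⟩ : ∃ K', K = K' + 1 := ⟨K - 1, by omega⟩
  have hrow : rowFn (K' + 1) f = f 0 :: (List.range K').map (fun t => f (t + 1)) := by
    rw [rowFn, List.range_succ_eq_map]
    simp [List.map_map]
  rw [hrow, PySem.List.max?_id_cons, Option.getD_some]
  have : Rmax (K' + 1) f = ((List.range (K' + 1)).map f).foldl max 0 := by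
    rw [Rmax, List.foldl_map]
  rw [this, List.range_succ_eq_map]
  simp only [List.map_cons, List.foldl_cons, List.map_map]
  rw [max_eq_right hf]
  rfl

lemma innerA_tab (nums : List Int) (k : Int) (hk : 0 < k) {n K i j : Nat} (hK : K = k.toNat)
    (hin : i < n) (hjn : j < n) (g : Nat → Nat → Int) :
    innerA nums k (i : Int) (tabFn n K g) (j : Int)
      = tabFn n K (fun i' => if i' = i then
          (fun v => if v = (remA nums k i j).toNat
                    then max (g i (remA nums k i j).toNat) (g j (remA nums k i j).toNat + 1)
                    else g i v)
          else g i') := by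
  have h0 := PySem.Int.mod_nonneg (nums.getD i 0 + nums.getD j 0) hk
  have h1 := PySem.Int.mod_lt (nums.getD i 0 + nums.getD j 0) hk
  unfold innerA
  rw [PySem.List.pyGetD_natCast nums i 0, PySem.List.pyGetD_natCast nums j 0]
  rw [PySem.List.pyGetD_natCast _ i [], PySem.List.pyGetD_natCast _ j []]
  rw [tabFn_getD _ hin, tabFn_getD _ hjn]
  rw [rowFn_pyGetD _ h0 (by omega), rowFn_pyGetD _ h0 (by omega)]
  rw [PySem.List.pySetD_of_nonneg _ _ h0, PySem.List.pySetD_natCast]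
  rw [rowFn_set, tabFn_set]
  rfl

lemma A_innerfold (nums : List Int) (k : Int) (hk : 0 < k) {n K i : Nat} (hK : K = k.toNat)
    (hin : i < n) (g : Nat → Nat → Int) (hg0 : ∀ v, g i v = 0) :
    ∀ p, p ≤ i →
      (List.range p).foldl (fun dp (j : Nat) => innerA nums k (i : Int) dp (j : Int)) (tabFn n K g)
        = tabFn n K (fun i' v =>
            if i' = i then Rmax p (fun j => if remA nums k i j = (v : Int) then g j v + 1 else 0)
            else g i' v) := by
  intro p
  induction p with
  | zero =>
    intro _
    apply tabFn_congr
    intro i' _ v _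
    rcases eq_or_ne i' i with h' | h'
    · simp [h', Rmax_zero, hg0 v]
    · simp [h']
  | succ p ih =>
    intro hp
    rw [List.range_succ, List.foldl_append, List.foldl_cons, List.foldl_nil, ih (by omega)]
    rw [innerA_tab nums k hk hK hin (by omega)]
    set rN := (remA nums k i p).toNat with hrN
    have hrem0 := PySem.Int.mod_nonneg (nums.getD i 0 + nums.getD p 0) hk
    have hremlt := PySem.Int.mod_lt (nums.getD i 0 + nums.getD p 0) hk
    have hcast : (rN : Int) = remA nums k i p := by
      rw [hrN]; unfold remA; omega
    apply tabFn_congr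
    intro i' hi' v hv
    rcases eq_or_ne i' i with h' | h'
    · subst h'
      have hne' : p ≠ i' := by omega
      rw [Rmax_succ]
      rcases eq_or_ne v rN with hv' | hv'
      · subst hv'
        simp [hne', ← hcast]
      · have hcond : remA nums k i' p ≠ (v : Int) := by
          rw [← hcast]
          intro h
          exact hv' (by exact_mod_cast h.symm)
        simp [hv', hcond, max_eq_left (Rmax_nonneg p
          (fun j => if remA nums k i' j = (v : Int) then g j v + 1 else 0))]
    · simp [h']

lemma A_innerfull (nums : List Int) (k : Int) (hk : 0 < k) {n K i : Nat} (hK : K = k.toNat)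
    (hin : i < n) (g : Nat → Nat → Int) (hg0 : ∀ v, g i v = 0)
    (hgd : ∀ j < i, ∀ v < K, g j v = dA nums k j (v : Int)) :
    (List.range i).foldl (fun dp (j : Nat) => innerA nums k (i : Int) dp (j : Int)) (tabFn n K g)
      = tabFn n K (fun i' v => if i' = i then dA nums k i' (v : Int) else g i' v) := by
  rw [A_innerfold nums k hk hK hin g hg0 i (le_refl i)]
  apply tabFn_congr
  intro i' _ v hv
  rcases eq_or_ne i' i with h' | h'
  · subst h'
    simp only [if_pos rfl]
    rw [dA_eq]
    exact (Rmax_congr _ _ _ (fun j hj => by rw [hgd j hj v hv])).symm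
  · simp [h']

lemma A_outerfold (nums : List Int) (k : Int) (hk : 0 < k) {K : Nat} (hK : K = k.toNat) :
    ∀ m, m ≤ nums.length - 1 →
      (List.range m).foldl (fun dp (t : Nat) => outerA nums k dp (1 + (t : Int)))
          (tabFn nums.length K (fun _ _ => 0))
        = tabFn nums.length K (fun i v => if i ≤ m then dA nums k i (v : Int) else 0) := by
  intro m
  induction m with
  | zero =>
    intro _
    apply tabFn_congr
    intro i _ v _
    rcases Nat.eq_zero_or_pos i with h' | h'
    · simp [h', dA_zero]
    · rw [if_neg (by omega)]
  | succ m ih =>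
    intro hm
    have hlen : m + 1 < nums.length := by omega
    rw [List.range_succ, List.foldl_append, List.foldl_cons, List.foldl_nil, ih (by omega)]
    show outerA nums k _ (1 + (m : Int)) = _
    have hcast : (1 : Int) + (m : Int) = ((m + 1 : Nat) : Int) := by push_cast; ring
    rw [hcast]
    unfold outerA
    rw [pyRange_zero_pos _ (by exact_mod_cast Nat.zero_le (m+1)), Int.toNat_natCast,
        List.foldl_map]
    rw [A_innerfull nums k hk hK hlen _ (fun v => by rw [if_neg (by omega)])
          (fun j hj v _ => by rw [if_pos (by omega)])]
    apply tabFn_congr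
    intro i _ v _
    rcases eq_or_ne i (m + 1) with h' | h'
    · simp [h']
    · rcases Nat.lt_or_ge i (m + 1) with h2 | h2
      · rw [if_neg h', if_pos (by omega), if_pos (by omega)]
      · rw [if_neg h', if_neg (by omega), if_neg (by omega)]

lemma portA_eval (nums : List Int) (k : Int) (hk : 1 ≤ k) (hne : nums ≠ []) :
    maximumLength nums k
      = 1 + Rmax nums.length (fun i => Rmax k.toNat (fun v => dA nums k i (v : Int))) := by
  have hk0 : (0 : Int) < k := by omega
  have hK0 : 0 < k.toNat := by omega
  have hn0 : 0 < nums.length := List.length_pos_of_ne_nil hne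
  rw [portA_unfold, init_tab nums.length k rfl]
  rw [PySem.List.pyRange_one 1 (nums.length : Int)]
  have hlen1 : ((nums.length : Int) - 1).toNat = nums.length - 1 := by omega
  rw [hlen1, List.foldl_map]
  rw [A_outerfold nums k hk0 rfl (nums.length - 1) (le_refl _)]
  have htab : tabFn nums.length k.toNat
        (fun i v => if i ≤ nums.length - 1 then dA nums k i (v : Int) else 0)
      = tabFn nums.length k.toNat (fun i v => dA nums k i (v : Int)) := by
    apply tabFn_congr
    intro i hi v _
    rw [if_pos (by omega)]
  rw [htab]
  have hmap : (tabFn nums.length k.toNat (fun i v => dA nums k i (v : Int))).map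
        (fun row => (PySem.List.max? row (fun y => y)).getD 0)
      = rowFn nums.length (fun i => Rmax k.toNat (fun v => dA nums k i (v : Int))) := by
    rw [tabFn, List.map_map, rowFn]
    apply List.map_congr_left
    intro i _
    exact maxD_rowFn hK0 _ (dA_nonneg nums k i 0)
  rw [hmap, maxD_rowFn hn0 _ (Rmax_nonneg _ _)]


-- ===== B-side model =====

-- residue (mod k) of element j
def resI (nums : List Int) (k : Int) (j : Nat) : Int := PySem.Int.mod (nums.getD j 0) k

-- Boolean "some element among the first m has residue w"
def seenB (nums : List Int) (k : Int) (m : Nat) (w : Int) : Bool :=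
  (List.range m).any (fun j => resI nums k j == w)

-- pair-sum residue of two residues
def pairRem (k w v : Int) : Int := PySem.Int.mod (w + v) k

-- model of chain[(w, v)] after m elements: longest (≥ 2)-chain ending with residues w, v
def M2 (nums : List Int) (k : Int) (m : Nat) (w v : Int) : Int :=
  Rmax m (fun j => if resI nums k j = v ∧ seenB nums k j w = true
                   then dA nums k j (pairRem k w v) + 1 else 0)

-- model of best after m elements (= A's answer on the length-m prefix; 0 for m = 0)
def bestF (nums : List Int) (k : Int) (m : Nat) : Int :=
  if m = 0 then 0
  else 1 + Rmax m (fun j => Rmax k.toNat (fun rn => dA nums k j (rn : Int)))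

-- the two loop bodies of port B, named for the proofs (definitionally the port's lambdas)
def stepW (k v : Int) (bc : Int × PySem.Dict (Int × Int) Int) (w : Int) :
    Int × PySem.Dict (Int × Int) Int :=
  if bc.2.getD (v, w) 1 + 1 > bc.2.getD (w, v) 0 then
    (if bc.2.getD (v, w) 1 + 1 > bc.1 then bc.2.getD (v, w) 1 + 1 else bc.1,
     bc.2.insert (w, v) (bc.2.getD (v, w) 1 + 1))
  else bc

def stepB (k : Int) (st : Int × PySem.Dict (Int × Int) Int × PySem.Set Int) (x : Int) :
    Int × PySem.Dict (Int × Int) Int × PySem.Set Int :=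
  ((st.2.2.foldl (stepW k (PySem.Int.mod x k)) ((if st.1 < 1 then 1 else st.1), st.2.1)).1,
   (st.2.2.foldl (stepW k (PySem.Int.mod x k)) ((if st.1 < 1 then 1 else st.1), st.2.1)).2,
   PySem.Set.add st.2.2 (PySem.Int.mod x k))

lemma portB_unfold (nums : List Int) (k : Int) :
    maximumLength_alt nums k
      = (nums.foldl (stepB k) (0, PySem.Dict.empty, PySem.Set.empty)).1 := rfl

-- ===== arithmetic helpers =====

lemma mod_idem (a k : Int) (hk : 0 < k) :
    PySem.Int.mod (PySem.Int.mod a k) k = PySem.Int.mod a k := by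
  rw [PySem.Int.mod_eq_emod_of_pos hk, PySem.Int.mod_eq_emod_of_pos hk]
  exact Int.emod_emod_of_dvd a (dvd_refl k)

lemma mod_add_mod_mod (a b k : Int) (hk : 0 < k) :
    PySem.Int.mod (PySem.Int.mod a k + PySem.Int.mod b k) k = PySem.Int.mod (a + b) k := by
  rw [PySem.Int.mod_eq_emod_of_pos hk, PySem.Int.mod_eq_emod_of_pos hk,
      PySem.Int.mod_eq_emod_of_pos hk, PySem.Int.mod_eq_emod_of_pos hk]
  exact (Int.add_emod a b k).symm

lemma mod_sub_mod_left (a b k : Int) (hk : 0 < k) :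
    PySem.Int.mod (PySem.Int.mod a k - b) k = PySem.Int.mod (a - b) k := by
  rw [PySem.Int.mod_eq_emod_of_pos hk, PySem.Int.mod_eq_emod_of_pos hk,
      PySem.Int.mod_eq_emod_of_pos hk]
  rw [Int.sub_emod (a % k) b, Int.emod_emod_of_dvd a (dvd_refl k), ← Int.sub_emod]

lemma pairRem_comm (k w v : Int) : pairRem k w v = pairRem k v w := by
  rw [pairRem, pairRem, add_comm]

lemma pairRem_nonneg (k w v : Int) (hk : 0 < k) : 0 ≤ pairRem k w v :=
  PySem.Int.mod_nonneg _ hk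

lemma pairRem_lt (k w v : Int) (hk : 0 < k) : pairRem k w v < k :=
  PySem.Int.mod_lt _ hk

lemma pairRem_eq_remA (nums : List Int) (k : Int) (hk : 0 < k) (m j : Nat) :
    pairRem k (resI nums k j) (resI nums k m) = remA nums k m j := by
  rw [pairRem, resI, resI, remA, mod_add_mod_mod _ _ _ hk, add_comm]

-- the loop condition: a pair (m, j) realises target pairRem k w (resI m) iff j has residue w
lemma condW (nums : List Int) (k : Int) (hk : 0 < k) (m j : Nat) (w : Int)
    (hw : PySem.Int.mod w k = w) :
    remA nums k m j = pairRem k w (resI nums k m) ↔ resI nums k j = w := by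
  have h0 := pairRem_nonneg k w (resI nums k m) hk
  have h1 := pairRem_lt k w (resI nums k m) hk
  rw [remA, add_comm (nums.getD m 0) (nums.getD j 0),
      cond_iff (nums.getD j 0) (nums.getD m 0) _ k hk h0 h1]
  have hshift : PySem.Int.mod (pairRem k w (resI nums k m) - nums.getD m 0) k = w := by
    rw [pairRem, resI, mod_sub_mod_left _ _ _ hk]
    have hb : PySem.Int.mod (nums.getD m 0) k
        = nums.getD m 0 - k * (nums.getD m 0 / k) := by
      rw [PySem.Int.mod_eq_emod_of_pos hk, Int.emod_def]
    have : w + PySem.Int.mod (nums.getD m 0) k - nums.getD m 0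
        = w + k * (-(nums.getD m 0 / k)) := by rw [hb]; ring
    rw [this, PySem.Int.mod_eq_emod_of_pos hk, Int.add_mul_emod_self_left, 
        ← PySem.Int.mod_eq_emod_of_pos hk, hw]
  rw [hshift, resI]

-- ===== seenB / set facts =====

lemma seenB_iff (nums : List Int) (k : Int) (m : Nat) (w : Int) :
    seenB nums k m w = true ↔ ∃ j < m, resI nums k j = w := by
  simp [seenB, List.any_eq_true, List.mem_range]

lemma seenB_canon (nums : List Int) (k : Int) (hk : 0 < k) (m : Nat) (w : Int)
    (h : seenB nums k m w = true) : PySem.Int.mod w k = w := by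
  obtain ⟨j, _, hj⟩ := (seenB_iff nums k m w).mp h
  rw [← hj, resI, mod_idem _ _ hk]

lemma mem_seenList (nums : List Int) (k : Int) (m : Nat) (hm : m ≤ nums.length) (w : Int) :
    w ∈ PySem.Set.ofList ((nums.take m).map (fun x => PySem.Int.mod x k))
      ↔ seenB nums k m w = true := by
  rw [PySem.Set.mem_ofList, seenB_iff, List.mem_map]
  constructor
  · rintro ⟨x, hx, rfl⟩
    obtain ⟨i, hi, rfl⟩ := List.mem_iff_getElem.mp hx
    simp only [List.length_take, Nat.lt_min] at hi
    have hin : i < nums.length := hi.2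
    refine ⟨i, hi.1, ?_⟩
    rw [resI, List.getD_eq_getElem nums 0 hin, List.getElem_take]
  · rintro ⟨j, hj, hw⟩
    have hj' : j < nums.length := by omega
    refine ⟨nums[j], ?_, ?_⟩
    · have : (nums.take m)[j]'(by simp [List.length_take]; omega) = nums[j] :=
        List.getElem_take
      rw [← this]
      exact List.getElem_mem _
    · rw [← hw, resI, List.getD_eq_getElem nums 0 hj']

-- ===== dA bridges =====

lemma dA_expand (nums : List Int) (k : Int) (hk : 0 < k) (m : Nat) (w : Int)
    (hw : PySem.Int.mod w k = w) :
    dA nums k m (pairRem k w (resI nums k m))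
      = Rmax m (fun j => if resI nums k j = w
                         then dA nums k j (pairRem k w (resI nums k m)) + 1 else 0) := by
  rw [dA_eq]
  exact Rmax_congr _ _ _ (fun j _ => if_congr (condW nums k hk m j w hw) rfl rfl)

lemma dA_pos_of_seen (nums : List Int) (k : Int) (hk : 0 < k) (m : Nat) (w : Int)
    (h : seenB nums k m w = true) :
    1 ≤ dA nums k m (pairRem k w (resI nums k m)) := by
  obtain ⟨j, hj, hjw⟩ := (seenB_iff nums k m w).mp h
  rw [dA_expand nums k hk m w (seenB_canon nums k hk m w h)]
  have h1 := le_Rmax m (fun j => if resI nums k j = w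
      then dA nums k j (pairRem k w (resI nums k m)) + 1 else 0) hj
  simp only at h1
  rw [if_pos hjw] at h1
  have h2 := dA_nonneg nums k j (pairRem k w (resI nums k m))
  omega

lemma dA_zero_of_not_seen (nums : List Int) (k : Int) (hk : 0 < k) (m : Nat) (w : Int)
    (hw : PySem.Int.mod w k = w) (h : ¬ seenB nums k m w = true) :
    dA nums k m (pairRem k w (resI nums k m)) = 0 := by
  rw [dA_expand nums k hk m w hw]
  apply le_antisymm _ (Rmax_nonneg _ _)
  rw [Rmax_le_iff]
  refine ⟨le_refl 0, fun j hj => ?_⟩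
  rw [if_neg (fun hc => h ((seenB_iff nums k m w).mpr ⟨j, hj, hc⟩))]

lemma Rmax_dichot (m : Nat) (g : Nat → Int) (h : ∀ j < m, g j = 0 ∨ 2 ≤ g j) :
    Rmax m g = 0 ∨ 2 ≤ Rmax m g := by
  by_cases hle : Rmax m g ≤ 1
  · left
    have h2 := (Rmax_le_iff m g 1).mp hle
    have h3 : Rmax m g ≤ 0 := by
      rw [Rmax_le_iff]
      refine ⟨le_refl 0, fun j hj => ?_⟩
      rcases h j hj with h' | h'
      · omega
      · have := h2.2 j hj; omega
    have := Rmax_nonneg m g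
    omega
  · right; omega

lemma M2_zero_or_ge2 (nums : List Int) (k : Int) (hk : 0 < k) (m : Nat) (w v : Int) :
    M2 nums k m w v = 0 ∨ 2 ≤ M2 nums k m w v := by
  apply Rmax_dichot
  intro j hj
  by_cases hc : resI nums k j = v ∧ seenB nums k j w = true
  · right
    rw [if_pos hc]
    have h1 := dA_pos_of_seen nums k hk j w hc.2
    rw [hc.1] at h1
    omega
  · left
    rw [if_neg hc]

lemma M2_succ (nums : List Int) (k : Int) (m : Nat) (w v : Int) :
    M2 nums k (m + 1) w v
      = max (M2 nums k m w v)
          (if resI nums k m = v ∧ seenB nums k m w = true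
           then dA nums k m (pairRem k w v) + 1 else 0) := by
  rw [M2, Rmax_succ, M2]

-- dA at the current element from the stored chain value: what the inner loop reads
lemma dA_bridge (nums : List Int) (k : Int) (hk : 0 < k) (m : Nat) (w : Int)
    (h : seenB nums k m w = true) :
    dA nums k m (pairRem k w (resI nums k m))
      = max 1 (M2 nums k m (resI nums k m) w) := by
  have hw := seenB_canon nums k hk m w h
  have hv : PySem.Int.mod (resI nums k m) k = resI nums k m := mod_idem _ _ hk
  apply le_antisymm
  · rw [dA_expand nums k hk m w hw, Rmax_le_iff]
    refine ⟨by omega, fun j hj => ?_⟩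
    by_cases hc : resI nums k j = w
    · by_cases hs : seenB nums k j (resI nums k m) = true
      · rw [if_pos hc]
        have h1 := le_Rmax m (fun j' => if resI nums k j' = w ∧
              seenB nums k j' (resI nums k m) = true
            then dA nums k j' (pairRem k (resI nums k m) w) + 1 else 0) hj
        simp only at h1
        rw [if_pos ⟨hc, hs⟩] at h1
        rw [pairRem_comm k w (resI nums k m)]
        exact le_trans h1 (le_max_right 1 _)
      · have h0 : dA nums k j (pairRem k (resI nums k m) (resI nums k j)) = 0 :=
          dA_zero_of_not_seen nums k hk j (resI nums k m) hv hs
        rw [hc] at h0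
        rw [if_pos hc, pairRem_comm k w (resI nums k m), h0]
        omega
    · rw [if_neg hc]; omega
  · apply max_le
    · exact dA_pos_of_seen nums k hk m w h
    · rw [dA_expand nums k hk m w hw, M2, Rmax_le_iff]
      refine ⟨Rmax_nonneg _ _, fun j hj => ?_⟩
      by_cases hc : resI nums k j = w ∧ seenB nums k j (resI nums k m) = true
      · rw [if_pos hc, pairRem_comm k (resI nums k m) w]
        have h1 := le_Rmax m (fun j' => if resI nums k j' = w
            then dA nums k j' (pairRem k w (resI nums k m)) + 1 else 0) hj
        simp only at h1
        rw [if_pos hc.1] at h1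
        exact h1
      · rw [if_neg hc]
        exact Rmax_nonneg _ _

lemma dA_le_RmaxK (nums : List Int) (k : Int) (hk : 0 < k) (j : Nat) (r : Int)
    (h0 : 0 ≤ r) (h1 : r < k) :
    dA nums k j r ≤ Rmax k.toNat (fun rn => dA nums k j (rn : Int)) := by
  have hr : r = ((r.toNat : Nat) : Int) := (Int.toNat_of_nonneg h0).symm
  rw [hr]
  exact le_Rmax _ _ (by omega)

lemma bestF_ge_one (nums : List Int) (k : Int) {m : Nat} (hm : 0 < m) :
    1 ≤ bestF nums k m := by
  rw [bestF, if_neg (by omega)]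
  have := Rmax_nonneg m (fun j => Rmax k.toNat (fun rn => dA nums k j (rn : Int)))
  omega

lemma M2_le (nums : List Int) (k : Int) (hk : 0 < k) (m : Nat) (w v : Int)
    (h0 : 0 ≤ pairRem k w v) (h1 : pairRem k w v < k) :
    M2 nums k m w v ≤ max (bestF nums k m) 1 := by
  rw [M2, Rmax_le_iff]
  refine ⟨by omega, fun j hj => ?_⟩
  by_cases hc : resI nums k j = v ∧ seenB nums k j w = true
  · rw [if_pos hc]
    have hm : m ≠ 0 := by omega
    have h2 := dA_le_RmaxK nums k hk j (pairRem k w v) h0 h1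
    have h3 := le_Rmax m (fun j => Rmax k.toNat (fun rn => dA nums k j (rn : Int))) hj
    simp only at h3
    have h4 : dA nums k j (pairRem k w v) + 1 ≤ bestF nums k m := by
      rw [bestF, if_neg hm]
      omega
    omega
  · rw [if_neg hc]
    omega

lemma foldl_max_le {α : Type} (l : List α) (f : α → Int) (init b : Int)
    (h0 : init ≤ b) (h : ∀ x ∈ l, f x ≤ b) :
    l.foldl (fun a x => max a (f x)) init ≤ b := by
  induction l generalizing init with
  | nil => exact h0
  | cons x t ih =>
    simp only [List.foldl_cons]
    exact ih _ (max_le h0 (h x List.mem_cons_self)) (fun y hy => h y (List.mem_cons_of_mem x hy))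

-- ===== the inner loop over `seen` =====

lemma foldW_spec (nums : List Int) (k : Int) (hk : 0 < k) (m : Nat) :
    ∀ (ws done : List Int) (chain : PySem.Dict (Int × Int) Int) (best : Int),
      (done ++ ws).Nodup →
      (∀ w ∈ done ++ ws, seenB nums k m w = true) →
      (∀ a b : Int, chain.get? (a, b) =
          if b = resI nums k m ∧ a ∈ done
          then some (M2 nums k (m + 1) a b)
          else if M2 nums k m a b = 0 then none else some (M2 nums k m a b)) →
      best = done.foldl
          (fun acc w => max acc (dA nums k m (pairRem k w (resI nums k m)) + 1))
          (max (bestF nums k m) 1) →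
      (ws.foldl (stepW k (resI nums k m)) (best, chain)).1
          = (done ++ ws).foldl
              (fun acc w => max acc (dA nums k m (pairRem k w (resI nums k m)) + 1))
              (max (bestF nums k m) 1)
      ∧ ∀ a b : Int, (ws.foldl (stepW k (resI nums k m)) (best, chain)).2.get? (a, b) =
          if b = resI nums k m ∧ a ∈ done ++ ws
          then some (M2 nums k (m + 1) a b)
          else if M2 nums k m a b = 0 then none else some (M2 nums k m a b) := by
  intro ws
  induction ws with
  | nil =>
    intro done chain best hnd hmem hchain hbest
    simp only [List.foldl_nil, List.append_nil]
    exact ⟨hbest, hchain⟩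
  | cons w ws ih =>
    intro done chain best hnd hmem hchain hbest
    have hv : PySem.Int.mod (resI nums k m) k = resI nums k m := mod_idem _ _ hk
    have hw : seenB nums k m w = true := hmem w (by simp)
    have hwd : w ∉ done := fun hcon =>
      (List.disjoint_of_nodup_append hnd) hcon List.mem_cons_self
    -- value the loop reads at (v, w)
    have hget_vw : chain.getD (resI nums k m, w) 1
        = max 1 (M2 nums k m (resI nums k m) w) := by
      rw [PySem.Dict.getD_eq_get?_getD, hchain (resI nums k m) w]
      have hcase : ¬ (w = resI nums k m ∧ resI nums k m ∈ done) := by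
        rintro ⟨rfl, hmem'⟩
        exact hwd hmem'
      rw [if_neg hcase]
      rcases M2_zero_or_ge2 nums k hk m (resI nums k m) w with h' | h'
      · rw [h', if_pos rfl]; simp
      · rw [if_neg (by omega)]
        simp
        omega
    have hget_wv : chain.getD (w, resI nums k m) 0 = M2 nums k m w (resI nums k m) := by
      rw [PySem.Dict.getD_eq_get?_getD, hchain w (resI nums k m)]
      have hcase : ¬ (resI nums k m = resI nums k m ∧ w ∈ done) := by
        rintro ⟨_, hmem'⟩
        exact hwd hmem'
      rw [if_neg hcase]
      rcases eq_or_ne (M2 nums k m w (resI nums k m)) 0 with h' | h'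
      · rw [if_pos h', h']; rfl
      · rw [if_neg h']; rfl
    have hcur : chain.getD (resI nums k m, w) 1 + 1
        = dA nums k m (pairRem k w (resI nums k m)) + 1 := by
      rw [hget_vw, dA_bridge nums k hk m w hw]
    have hcur2 : 1 ≤ dA nums k m (pairRem k w (resI nums k m)) :=
      dA_pos_of_seen nums k hk m w hw
    have hM2succ : M2 nums k (m + 1) w (resI nums k m)
        = max (M2 nums k m w (resI nums k m))
            (dA nums k m (pairRem k w (resI nums k m)) + 1) := by
      rw [M2_succ, if_pos ⟨rfl, hw⟩]
    have hnd' : ((done ++ [w]) ++ ws).Nodup := by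
      rwa [show done ++ w :: ws = (done ++ [w]) ++ ws from by simp] at hnd
    have hmem' : ∀ w' ∈ (done ++ [w]) ++ ws, seenB nums k m w' = true := by
      intro w' hw'
      exact hmem w' (by rw [show (done ++ [w]) ++ ws = done ++ w :: ws from by simp] at hw'; exact hw')
    simp only [List.foldl_cons]
    rw [show done ++ w :: ws = (done ++ [w]) ++ ws from by simp]
    by_cases hgt : chain.getD (resI nums k m, w) 1 + 1 > chain.getD (w, resI nums k m) 0
    · have hgt' : M2 nums k m w (resI nums k m)
          < dA nums k m (pairRem k w (resI nums k m)) + 1 := by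
        rw [hget_wv, hcur] at hgt; exact hgt
      have hsw : stepW k (resI nums k m) (best, chain) w
          = (max best (dA nums k m (pairRem k w (resI nums k m)) + 1),
             chain.insert (w, resI nums k m)
               (dA nums k m (pairRem k w (resI nums k m)) + 1)) := by
        show (if _ > _ then _ else _) = _
        rw [if_pos hgt, hcur]
        by_cases h2 : dA nums k m (pairRem k w (resI nums k m)) + 1 > best
        · rw [if_pos h2, max_eq_right (le_of_lt h2)]
        · rw [if_neg h2, max_eq_left (by omega)]
      rw [hsw]
      apply ih (done ++ [w]) _ _ hnd' hmem'
      · intro a b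
        rw [PySem.Dict.get?_insert]
        rcases eq_or_ne (a, b) ((w, resI nums k m) : Int × Int) with hab | hab
        · rw [if_pos hab]
          have ha : a = w := (Prod.ext_iff.mp hab).1
          have hb : b = resI nums k m := (Prod.ext_iff.mp hab).2
          rw [ha, hb]
          rw [if_pos ⟨rfl, by simp⟩, hM2succ, max_eq_right (le_of_lt hgt')]
        · rw [if_neg hab, hchain a b]
          have hmemiff : (b = resI nums k m ∧ a ∈ done ++ [w])
              ↔ (b = resI nums k m ∧ a ∈ done) := by
            constructor
            · rintro ⟨rfl, hmem2⟩
              rcases List.mem_append.mp hmem2 with h' | h'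
              · exact ⟨rfl, h'⟩
              · exact (hab (by rw [List.mem_singleton.mp h'])).elim
            · rintro ⟨rfl, hmem2⟩
              exact ⟨rfl, List.mem_append.mpr (Or.inl hmem2)⟩
          by_cases hcond : b = resI nums k m ∧ a ∈ done
          · rw [if_pos hcond, if_pos (hmemiff.mpr hcond)]
          · rw [if_neg hcond, if_neg (fun h' => hcond (hmemiff.mp h'))]
      · rw [List.foldl_append, List.foldl_cons, List.foldl_nil, ← hbest]
    · have hle' : dA nums k m (pairRem k w (resI nums k m)) + 1
          ≤ M2 nums k m w (resI nums k m) := by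
        rw [hget_wv, hcur] at hgt; omega
      have hsw : stepW k (resI nums k m) (best, chain) w = (best, chain) := by
        show (if _ > _ then _ else _) = _
        rw [if_neg hgt]
      rw [hsw]
      apply ih (done ++ [w]) _ _ hnd' hmem'
      · intro a b
        rw [hchain a b]
        rcases eq_or_ne (a, b) ((w, resI nums k m) : Int × Int) with hab | hab
        · have ha : a = w := (Prod.ext_iff.mp hab).1
          have hb : b = resI nums k m := (Prod.ext_iff.mp hab).2
          rw [ha, hb]
          have hM2ne : M2 nums k m w (resI nums k m) ≠ 0 := by omega
          rw [if_neg (fun h' => hwd h'.2), if_neg hM2ne,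
              if_pos ⟨rfl, by simp⟩, hM2succ, max_eq_left (by omega)]
        · have hmemiff : (b = resI nums k m ∧ a ∈ done ++ [w])
              ↔ (b = resI nums k m ∧ a ∈ done) := by
            constructor
            · rintro ⟨rfl, hmem2⟩
              rcases List.mem_append.mp hmem2 with h' | h'
              · exact ⟨rfl, h'⟩
              · exact (hab (by rw [List.mem_singleton.mp h'])).elim
            · rintro ⟨rfl, hmem2⟩
              exact ⟨rfl, List.mem_append.mpr (Or.inl hmem2)⟩
          by_cases hcond : b = resI nums k m ∧ a ∈ done
          · rw [if_pos hcond, if_pos (hmemiff.mpr hcond)]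
          · rw [if_neg hcond, if_neg (fun h' => hcond (hmemiff.mp h'))]
      · rw [List.foldl_append, List.foldl_cons, List.foldl_nil, ← hbest]
        have hb1 : M2 nums k m w (resI nums k m) ≤ max (bestF nums k m) 1 :=
          M2_le nums k hk m w (resI nums k m)
            (pairRem_nonneg _ _ _ hk) (pairRem_lt _ _ _ hk)
        have hb2 := (PySem.List.le_foldl_max_int done
            (fun w' => dA nums k m (pairRem k w' (resI nums k m)) + 1)
            (max (bestF nums k m) 1)).1
        rw [← hbest] at hb2
        rw [max_eq_left (by omega)]


lemma dA_pos_witness (nums : List Int) (k : Int) (m : Nat) (r : Int)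
    (h : 1 ≤ dA nums k m r) : ∃ j < m, remA nums k m j = r := by
  by_contra hcon
  push_neg at hcon
  have h2 : dA nums k m r ≤ 0 := by
    rw [dA_eq, Rmax_le_iff]
    exact ⟨le_refl 0, fun j hj => by rw [if_neg (hcon j hj)]⟩
  omega

-- one element turns best into A's answer for the one-longer prefix
lemma best_step (nums : List Int) (k : Int) (hk : 0 < k) (m : Nat) (ws : List Int)
    (hmem : ∀ w : Int, w ∈ ws ↔ seenB nums k m w = true) :
    ws.foldl (fun acc w => max acc (dA nums k m (pairRem k w (resI nums k m)) + 1))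
        (max (bestF nums k m) 1)
      = bestF nums k (m + 1) := by
  rcases Nat.eq_zero_or_pos m with rfl | hm
  · have hws : ws = [] := by
      rw [List.eq_nil_iff_forall_not_mem]
      intro w hw
      obtain ⟨j, hj, _⟩ := (seenB_iff nums k 0 w).mp ((hmem w).mp hw)
      omega
    subst hws
    simp only [List.foldl_nil]
    rw [bestF, if_pos rfl, bestF, if_neg (Nat.succ_ne_zero 0), Rmax_succ, Rmax_zero]
    have h0 : Rmax k.toNat (fun rn => dA nums k 0 (rn : Int)) = 0 := by
      apply le_antisymm _ (Rmax_nonneg _ _)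
      rw [Rmax_le_iff]
      exact ⟨le_refl 0, fun j _ => by rw [dA_zero]⟩
    rw [h0]
    decide
  · have hm0 : m ≠ 0 := by omega
    apply le_antisymm
    · apply foldl_max_le
      · rw [max_eq_left (bestF_ge_one nums k hm), bestF, bestF,
            if_neg hm0, if_neg (Nat.succ_ne_zero m), Rmax_succ]
        have := le_max_left (Rmax m (fun j => Rmax k.toNat (fun rn => dA nums k j (rn : Int))))
          (Rmax k.toNat (fun rn => dA nums k m (rn : Int)))
        omega
      · intro w hwin
        rw [bestF, if_neg (Nat.succ_ne_zero m)]
        have h1 := dA_le_RmaxK nums k hk m (pairRem k w (resI nums k m))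
          (pairRem_nonneg _ _ _ hk) (pairRem_lt _ _ _ hk)
        have h2 := le_Rmax (m + 1)
          (fun j => Rmax k.toNat (fun rn => dA nums k j (rn : Int))) (Nat.lt_succ_self m)
        simp only at h2
        omega
    · rw [bestF, if_neg (Nat.succ_ne_zero m)]
      have hinit := (PySem.List.le_foldl_max_int ws
          (fun w => dA nums k m (pairRem k w (resI nums k m)) + 1)
          (max (bestF nums k m) 1)).1
      have helem := (PySem.List.le_foldl_max_int ws
          (fun w => dA nums k m (pairRem k w (resI nums k m)) + 1)
          (max (bestF nums k m) 1)).2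
      set L := ws.foldl (fun acc w => max acc (dA nums k m (pairRem k w (resI nums k m)) + 1))
          (max (bestF nums k m) 1) with hL
      have hL1 : 1 ≤ L := le_trans (le_max_right _ 1) hinit
      have hLm : bestF nums k m ≤ L := le_trans (le_max_left _ 1) hinit
      have hRmF : Rmax m (fun j => Rmax k.toNat (fun rn => dA nums k j (rn : Int))) ≤ L - 1 := by
        have : bestF nums k m
            = 1 + Rmax m (fun j => Rmax k.toNat (fun rn => dA nums k j (rn : Int))) := by
          rw [bestF, if_neg hm0]
        omega
      have hFm : Rmax k.toNat (fun rn => dA nums k m (rn : Int)) ≤ L - 1 := by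
        rw [Rmax_le_iff]
        refine ⟨by omega, fun rn hrn => ?_⟩
        have hd := dA_nonneg nums k m (rn : Int)
        rcases eq_or_lt_of_le hd with hd0 | hd1
        · omega
        · obtain ⟨j, hj, hjr⟩ := dA_pos_witness nums k m (rn : Int) (by omega)
          have hwin : resI nums k j ∈ ws :=
            (hmem (resI nums k j)).mpr ((seenB_iff nums k m (resI nums k j)).mpr ⟨j, hj, rfl⟩)
          have hpr : pairRem k (resI nums k j) (resI nums k m) = (rn : Int) := by
            rw [pairRem_eq_remA nums k hk m j, hjr]
          have h3 := helem (resI nums k j) hwin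
          simp only at h3
          rw [hpr] at h3
          omega
      rw [Rmax_succ]
      omega

lemma setOfList_append (xs : List Int) (v : Int) :
    PySem.Set.ofList (xs ++ [v]) = PySem.Set.add (PySem.Set.ofList xs) v := by
  rw [PySem.Set.ofList_eq_foldl, PySem.Set.ofList_eq_foldl, List.foldl_append,
      List.foldl_cons, List.foldl_nil]

lemma M2_nonneg (nums : List Int) (k : Int) (m : Nat) (w v : Int) :
    0 ≤ M2 nums k m w v := Rmax_nonneg _ _

lemma B_invariant (nums : List Int) (k : Int) (hk : 0 < k) :
    ∀ m, m ≤ nums.length →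
      ((nums.take m).foldl (stepB k) (0, PySem.Dict.empty, PySem.Set.empty)).1
          = bestF nums k m
      ∧ (∀ a b : Int,
          ((nums.take m).foldl (stepB k) (0, PySem.Dict.empty, PySem.Set.empty)).2.1.get? (a, b)
            = if M2 nums k m a b = 0 then none else some (M2 nums k m a b))
      ∧ ((nums.take m).foldl (stepB k) (0, PySem.Dict.empty, PySem.Set.empty)).2.2
          = PySem.Set.ofList ((nums.take m).map (fun x => PySem.Int.mod x k)) := by
  intro m
  induction m with
  | zero =>
    intro _
    simp only [List.take_zero, List.foldl_nil]
    refine ⟨rfl, fun a b => ?_, rfl⟩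
    show (PySem.Dict.empty : PySem.Dict (Int × Int) Int).get? (a, b) = _
    rw [PySem.Dict.get?_empty, M2, Rmax_zero, if_pos rfl]
  | succ m ih =>
    intro hm
    obtain ⟨ih1, ih2, ih3⟩ := ih (by omega)
    have hmlt : m < nums.length := by omega
    have htake : nums.take (m + 1) = nums.take m ++ [nums.getD m 0] := by
      rw [List.take_succ, List.getElem?_eq_getElem hmlt, List.getD_eq_getElem nums 0 hmlt]
      rfl
    rw [htake, List.foldl_append, List.foldl_cons, List.foldl_nil]
    set st := (nums.take m).foldl (stepB k) (0, PySem.Dict.empty, PySem.Set.empty) with hst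
    have hres : PySem.Int.mod (nums.getD m 0) k = resI nums k m := rfl
    have hws : st.2.2 = PySem.Set.ofList ((nums.take m).map (fun x => PySem.Int.mod x k)) := ih3
    have hwsmem : ∀ w : Int, w ∈ st.2.2 ↔ seenB nums k m w = true := by
      intro w
      rw [hws]
      exact mem_seenList nums k m (by omega) w
    have hwsnd : st.2.2.Nodup := by
      rw [hws]; exact PySem.Set.nodup_ofList _
    have hbest0 : (if st.1 < 1 then 1 else st.1) = max (bestF nums k m) 1 := by
      rw [ih1]
      by_cases h : 1 ≤ bestF nums k m
      · rw [if_neg (by omega), max_eq_left h]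
      · rw [if_pos (by omega), max_eq_right (by omega)]
    have hfw := foldW_spec nums k hk m st.2.2 [] st.2.1
        (max (bestF nums k m) 1)
        (by simpa using hwsnd)
        (by intro w hw; exact (hwsmem w).mp (by simpa using hw))
        (by
          intro a b
          rw [ih2 a b]
          exact (if_neg (fun h => absurd h.2 (List.not_mem_nil))).symm)
        (by rw [List.foldl_nil])
    obtain ⟨hfw1, hfw2⟩ := hfw
    refine ⟨?_, fun a b => ?_, ?_⟩
    · show (st.2.2.foldl (stepW k (PySem.Int.mod (nums.getD m 0) k))
          ((if st.1 < 1 then 1 else st.1), st.2.1)).1 = _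
      rw [hres, hbest0, hfw1]
      simp only [List.nil_append]
      exact best_step nums k hk m st.2.2 hwsmem
    · show (st.2.2.foldl (stepW k (PySem.Int.mod (nums.getD m 0) k))
          ((if st.1 < 1 then 1 else st.1), st.2.1)).2.get? (a, b) = _
      rw [hres, hbest0, hfw2 a b]
      simp only [List.nil_append]
      by_cases hcond : b = resI nums k m ∧ a ∈ st.2.2
      · rw [if_pos hcond]
        have hsB : seenB nums k m a = true := (hwsmem a).mp hcond.2
        have hM2 : M2 nums k (m + 1) a b
            = max (M2 nums k m a b) (dA nums k m (pairRem k a b) + 1) := by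
          rw [M2_succ, if_pos ⟨hcond.1.symm, hsB⟩]
        have hd : 1 ≤ dA nums k m (pairRem k a b) := by
          rw [hcond.1]
          exact dA_pos_of_seen nums k hk m a hsB
        have hM2m := M2_nonneg nums k m a b
        rw [if_neg (by omega)]
      · rw [if_neg hcond]
        have hM2eq : M2 nums k (m + 1) a b = M2 nums k m a b := by
          rw [M2_succ]
          have hcf : ¬ (resI nums k m = b ∧ seenB nums k m a = true) := by
            rintro ⟨h1, h2⟩
            exact hcond ⟨h1.symm, (hwsmem a).mpr h2⟩
          rw [if_neg hcf]
          exact max_eq_left (M2_nonneg nums k m a b)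
        rw [hM2eq]
    · show PySem.Set.add st.2.2 (PySem.Int.mod (nums.getD m 0) k) = _
      rw [hws, List.map_append]
      simp only [List.map_cons, List.map_nil]
      rw [setOfList_append]

lemma portB_eval (nums : List Int) (k : Int) (hk : 1 ≤ k) :
    maximumLength_alt nums k = bestF nums k nums.length := by
  rw [portB_unfold]
  have h := (B_invariant nums k (by omega) nums.length (le_refl _)).1
  rwa [List.take_length] at h

-- ===== VERDICT (by name: the statement is the Claim_ definition above) =====

theorem maximumLength_spec : Claim_equal_maximumLength := by
  intro nums k _ hpre
  obtain ⟨hne, hk⟩ := hpre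
  unfold Spec_maximumLength
  rw [portA_eval nums k hk hne, portB_eval nums k hk, bestF,
      if_neg (fun h => hne (List.eq_nil_of_length_eq_zero h))]
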